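-- pv_equiv track=rewrite | github.com/hasbi93/HackerRank | 30 Days of Code/Day 10 - Binary Numbers/solution.py | count_consecutive
-- ===== SOURCE A (Python) =====
-- def count_consecutive(string, target_ch):
--     """Count the max consecutive character occurences in the string."""
--     count = 0
--     max_count = 0
--     for ch in string:
--         if ch == target_ch:
--             count += 1
--         elif count > 0:
--             max_count = max(count, max_count)
--             count = 0
--     max_count = max(count, max_count)
--     return max_count
-- ===== SOURCE B (Python) =====
-- def count_consecutive(string, target_ch):
--     """Count the max consecutive character occurences in the string."""
--     if len(target_ch) != 1:
--         return 0
--     lo, hi = 0, len(string)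
--     while lo < hi:
--         mid = (lo + hi + 1) // 2
--         if target_ch * mid in string:
--             lo = mid
--         else:
--             hi = mid - 1
--     return lo
-- ===== Notes on version B (the rewrite author's own statement) =====
-- stated objective: alternative
-- what changed: Replaces A's single-pass count/reset/max state machine with a binary search on the answer k, each step testing whether target_ch*k occurs as a substring of string (after a length-1 guard, since a multi-character target can never match a single character).
import Mathlib
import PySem

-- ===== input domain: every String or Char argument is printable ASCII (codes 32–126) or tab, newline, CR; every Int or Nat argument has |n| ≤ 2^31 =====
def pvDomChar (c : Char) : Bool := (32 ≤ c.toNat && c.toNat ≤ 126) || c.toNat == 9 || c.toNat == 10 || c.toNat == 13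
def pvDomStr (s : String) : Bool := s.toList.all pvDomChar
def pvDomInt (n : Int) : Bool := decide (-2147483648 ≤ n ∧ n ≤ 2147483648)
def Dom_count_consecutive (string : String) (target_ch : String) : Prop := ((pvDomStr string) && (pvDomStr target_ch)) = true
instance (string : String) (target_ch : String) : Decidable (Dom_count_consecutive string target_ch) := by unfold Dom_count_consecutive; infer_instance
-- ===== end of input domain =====

-- B replaces A's count/reset/max state machine with a binary search on the answer k, each step
-- testing whether target_ch*k is a substring; different algorithm (a timing run measured B faster).

-- ===== PORT A =====
-- loop body of A's for-loop, on the state (count, max_count); `ch == target_ch` is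
-- `[ch] = target_ch.toList` (a 1-char Python string equals target_ch iff target_ch is that char)
def pvStepA (t : List Char) (st : Int × Int) (ch : Char) : Int × Int :=
  if [ch] = t then (st.1 + 1, st.2)
  else if st.1 > 0 then (0, max st.1 st.2)
  else st

def count_consecutive (string : String) (target_ch : String) : Int :=
  let r := string.toList.foldl (pvStepA target_ch.toList) (0, 0)
  max r.1 r.2

-- ===== PORT B =====
-- Source B's while loop, state (lo, hi); `target_ch * mid in string` is
-- PySem.Chars.isIn (PySem.List.pyRepeat tl mid) sl (Python-exact repetition and containment)
def pvBS (sl tl : List Char) (lo hi : Int) : Int :=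
  if h : lo < hi then
    let mid := PySem.Int.floordiv (lo + hi + 1) 2
    if PySem.Chars.isIn (PySem.List.pyRepeat tl mid) sl then pvBS sl tl mid hi
    else pvBS sl tl lo (mid - 1)
  else lo
termination_by (hi - lo).toNat
decreasing_by
  all_goals
    simp only [PySem.Int.floordiv_eq_ediv_of_pos (by omega : (0:Int) < 2)]
    omega

def count_consecutive_alt (string : String) (target_ch : String) : Int :=
  if PySem.Str.len target_ch ≠ 1 then 0
  else pvBS string.toList target_ch.toList 0 (PySem.Str.len string)

-- ===== PRECONDITION & SPEC =====
def Spec_count_consecutive (string : String) (target_ch : String) (out : Int) : Prop := out = count_consecutive_alt string target_ch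
instance (string : String) (target_ch : String) (out : Int) : Decidable (Spec_count_consecutive string target_ch out) := by unfold Spec_count_consecutive; infer_instance

-- ===== CLAIM (what is proved, stated in full; the proofs are below) =====
def Claim_equal_count_consecutive : Prop := ∀ (string : String) (target_ch : String), Dom_count_consecutive string target_ch → Spec_count_consecutive string target_ch (count_consecutive string target_ch)

-- ===== LEMMAS AND PROOFS =====

-- reference function: max run length of t in l, where c is the length of the run in progress
def pvRef (t : List Char) : List Char → Nat → Nat
  | [], c => c
  | x :: xs, c => if [x] = t then pvRef t xs (c + 1) else max c (pvRef t xs 0)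

-- Bool form of the match predicate
def pvQ (t : List Char) (c : Char) : Bool := decide ([c] = t)

-- run-decomposition reference function
def pvRef2 (t : List Char) : List Char → Nat
  | [] => 0
  | x :: xs =>
    if [x] = t then
      max (1 + (xs.takeWhile (pvQ t)).length) (pvRef2 t (xs.dropWhile (pvQ t)))
    else pvRef2 t xs
termination_by l => l.length
decreasing_by
  · have := List.length_dropWhile_le (pvQ t) xs; simp; omega
  · simp

theorem pvFoldA_char (t : List Char) (l : List Char) (c m : Nat) :
    max (l.foldl (pvStepA t) ((c : Int), (m : Int))).1 (l.foldl (pvStepA t) ((c : Int), (m : Int))).2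
      = ((max m (pvRef t l c) : Nat) : Int) := by
  induction l generalizing c m with
  | nil => simp [pvRef]; omega
  | cons x xs ih =>
    by_cases h : [x] = t
    · have e : ((c : Int) + 1, (m : Int)) = (((c + 1 : Nat) : Int), ((m : Nat) : Int)) := by
        push_cast; rfl
      simp only [List.foldl_cons, pvStepA, if_pos h, e, ih, pvRef]
    · rcases Nat.eq_zero_or_pos c with hc | hc
      · subst hc
        have e : pvStepA t (((0 : Nat) : Int), ((m : Nat) : Int)) x = (((0 : Nat) : Int), ((m : Nat) : Int)) := by
          simp [pvStepA, h]
        rw [List.foldl_cons, e, ih]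
        have hr : pvRef t (x :: xs) 0 = max 0 (pvRef t xs 0) := by rw [pvRef, if_neg h]
        rw [hr]
        exact_mod_cast congrArg (Nat.cast (R := Int)) (by omega :
          max m (pvRef t xs 0) = max m (max 0 (pvRef t xs 0)))
      · have hc' : ((c : Nat) : Int) > 0 := by exact_mod_cast hc
        have e : pvStepA t (((c : Nat) : Int), ((m : Nat) : Int)) x = (((0 : Nat) : Int), ((max c m : Nat) : Int)) := by
          simp only [pvStepA, if_neg h, if_pos hc']
          simp [Nat.cast_max]
        rw [List.foldl_cons, e, ih]
        have hr : pvRef t (x :: xs) c = max c (pvRef t xs 0) := by rw [pvRef, if_neg h]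
        rw [hr]
        exact_mod_cast congrArg (Nat.cast (R := Int)) (by omega :
          max (max c m) (pvRef t xs 0) = max m (max c (pvRef t xs 0)))

theorem pvRef2_step (t : List Char) (l : List Char) :
    pvRef2 t l = max (l.takeWhile (pvQ t)).length (pvRef2 t (l.dropWhile (pvQ t))) := by
  cases l with
  | nil => simp [pvRef2]
  | cons x xs =>
    by_cases h : [x] = t
    · have hq : pvQ t x = true := by simp [pvQ, h]
      rw [pvRef2, if_pos h]
      simp [hq]
      omega
    · have hq : ¬ pvQ t x = true := by simp [pvQ, h]
      have hstep : pvRef2 t (x :: xs) = pvRef2 t xs := by rw [pvRef2, if_neg h]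
      rw [hstep]
      simp [hq, hstep]

theorem pvRef_eq_ref2_aux (t : List Char) (l : List Char) (c : Nat) :
    pvRef t l c = max (c + (l.takeWhile (pvQ t)).length) (pvRef2 t (l.dropWhile (pvQ t))) := by
  induction l generalizing c with
  | nil => simp [pvRef, pvRef2]
  | cons x xs ih =>
    by_cases h : [x] = t
    · have hq : pvQ t x = true := by simp [pvQ, h]
      rw [pvRef, if_pos h, ih]
      simp [hq]
      omega
    · have hq : ¬ pvQ t x = true := by simp [pvQ, h]
      rw [pvRef, if_neg h, ih]
      have hstep : pvRef2 t (x :: xs) = pvRef2 t xs := by rw [pvRef2, if_neg h]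
      simp [hq, hstep]
      rw [pvRef2_step t xs]

theorem pvRef_eq_ref2 (t : List Char) (l : List Char) : pvRef t l 0 = pvRef2 t l := by
  rw [pvRef_eq_ref2_aux, Nat.zero_add, ← pvRef2_step]

-- if t is not a 1-character string, no character ever matches and A's max stays 0
theorem pvRef2_of_len_ne_one (t : List Char) (h : t.length ≠ 1) (l : List Char) :
    pvRef2 t l = 0 := by
  induction l with
  | nil => rw [pvRef2]
  | cons x xs ih =>
    have hx : ¬ [x] = t := by intro he; apply h; rw [← he]; rfl
    rw [pvRef2, if_neg hx, ih]

-- a takeWhile segment for the predicate "= c" is literally a replicate of c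
theorem pvTakeWhile_replicate (c : Char) (l : List Char) :
    l.takeWhile (pvQ [c]) = List.replicate (l.takeWhile (pvQ [c])).length c := by
  rw [List.eq_replicate_iff]
  refine ⟨rfl, ?_⟩
  intro b hb
  have := List.mem_takeWhile_imp hb
  simp [pvQ] at this
  exact this

theorem pvReplicate_prefix (c : Char) {k m : Nat} (h : k ≤ m) :
    List.replicate k c <+: List.replicate m c := by
  refine ⟨List.replicate (m - k) c, ?_⟩
  rw [← List.replicate_add]
  congr 1
  omega

theorem pvPrefix_replicate_le (c : Char) (m : Nat) (l : List Char)
    (h : List.replicate m c <+: l) : m ≤ (l.takeWhile (pvQ [c])).length := by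
  induction m generalizing l with
  | zero => omega
  | succ n ih =>
    cases l with
    | nil => simp [List.replicate_succ] at h
    | cons x xs =>
      rw [List.replicate_succ, List.cons_prefix_cons] at h
      obtain ⟨hx, hp⟩ := h
      have hq : pvQ [c] x = true := by simp [pvQ, hx]
      rw [List.takeWhile_cons, if_pos hq]
      have := ih xs hp
      simp
      omega

-- k copies of c occur contiguously in l iff k is at most the longest run of c
theorem pvInfix_le (c : Char) (l : List Char) (k : Nat)
    (h : List.replicate k c <:+: l) : k ≤ pvRef2 [c] l := by
  induction l with
  | nil =>
    have := h.length_le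
    simp at this
    omega
  | cons x xs ih =>
    rcases List.infix_cons_iff.mp h with hp | hi
    · cases k with
      | zero => omega
      | succ n =>
        rw [List.replicate_succ, List.cons_prefix_cons] at hp
        obtain ⟨hx, hpre⟩ := hp
        subst hx
        have htw := pvPrefix_replicate_le c n xs hpre
        rw [pvRef2, if_pos rfl]
        omega
    · have h1 := ih hi
      -- pvRef2 is monotone under cons
      by_cases hx : [x] = [c]
      · have hc : x = c := by simpa using hx
        subst hc
        rw [pvRef2, if_pos rfl]
        rw [pvRef2_step [x] xs] at h1
        omega
      · rw [pvRef2, if_neg hx]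
        exact h1

theorem pvLe_infix_aux (n : Nat) : ∀ (l : List Char), l.length ≤ n → ∀ (c : Char) (k : Nat),
    k ≤ pvRef2 [c] l → List.replicate k c <:+: l := by
  induction n with
  | zero =>
    intro l hl c k h
    have hl0 : l = [] := List.length_eq_zero_iff.mp (by omega)
    subst hl0
    rw [pvRef2] at h
    have : k = 0 := by omega
    subst this
    simp
  | succ n ih =>
    intro l hl c k h
    cases l with
    | nil =>
      rw [pvRef2] at h
      have : k = 0 := by omega
      subst this
      simp
    | cons x xs =>
      by_cases hx : [x] = [c]
      · have hc : x = c := by simpa using hx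
        subst hc
        rw [pvRef2, if_pos rfl] at h
        by_cases h1 : k ≤ 1 + (xs.takeWhile (pvQ [x])).length
        · -- fits in the leading run x :: takeWhile
          have hpre : List.replicate k x <+: x :: xs.takeWhile (pvQ [x]) := by
            have he : x :: xs.takeWhile (pvQ [x])
                = List.replicate (1 + (xs.takeWhile (pvQ [x])).length) x := by
              rw [Nat.add_comm, List.replicate_succ]
              congr 1
              exact pvTakeWhile_replicate x xs
            rw [he]
            exact pvReplicate_prefix x h1
          have hfull : x :: xs.takeWhile (pvQ [x]) <+: x :: xs :=
            List.cons_prefix_cons.mpr ⟨rfl, List.takeWhile_prefix _⟩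
          exact (hpre.trans hfull).isInfix
        · -- lives in the rest, a suffix of xs
          have h2 : k ≤ pvRef2 [x] (xs.dropWhile (pvQ [x])) := by omega
          have hlen : (xs.dropWhile (pvQ [x])).length ≤ n := by
            have := List.length_dropWhile_le (pvQ [x]) xs
            simp at hl
            omega
          have hrec := ih (xs.dropWhile (pvQ [x])) hlen x k h2
          have hsuf : xs.dropWhile (pvQ [x]) <:+ x :: xs :=
            (List.dropWhile_suffix _).trans (xs.suffix_cons x)
          exact hrec.trans hsuf.isInfix
      · rw [pvRef2, if_neg hx] at h
        have hrec := ih xs (by simp at hl; omega) c k h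
        exact hrec.trans (xs.suffix_cons x).isInfix

theorem pvLe_infix (c : Char) (l : List Char) (k : Nat)
    (h : k ≤ pvRef2 [c] l) : List.replicate k c <:+: l :=
  pvLe_infix_aux l.length l le_rfl c k h

-- binary search invariant: with lo ≤ M ≤ hi and feasibility ≡ (· ≤ M), the loop returns M
theorem pvBS_eq (sl tl : List Char) (M : Nat)
    (hfeas : ∀ k : Int, PySem.Chars.isIn (PySem.List.pyRepeat tl k) sl = true ↔ k.toNat ≤ M)
    (lo hi : Int) (h0 : 0 ≤ lo) (hlo : lo ≤ (M : Int)) (hhi : (M : Int) ≤ hi) :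
    pvBS sl tl lo hi = (M : Int) := by
  rw [pvBS]
  split
  · rename_i hlt
    have hmid : PySem.Int.floordiv (lo + hi + 1) 2 = (lo + hi + 1) / 2 :=
      PySem.Int.floordiv_eq_ediv_of_pos (by omega)
    simp only [hmid]
    set mid := (lo + hi + 1) / 2 with hm
    have hb1 : lo < mid := by omega
    have hb2 : mid ≤ hi := by omega
    split
    · rename_i hf
      have := (hfeas mid).mp hf
      exact pvBS_eq sl tl M hfeas mid hi (by omega) (by omega) hhi
    · rename_i hf
      have hnot : ¬ mid.toNat ≤ M := fun hh => hf ((hfeas mid).mpr hh)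
      exact pvBS_eq sl tl M hfeas lo (mid - 1) h0 hlo (by omega)
  · omega
termination_by (hi - lo).toNat
decreasing_by
  all_goals omega

-- ===== VERDICT (by name: the statement is the Claim_ definition above) =====
theorem count_consecutive_spec : Claim_equal_count_consecutive := by
  intro s t _
  unfold Spec_count_consecutive count_consecutive count_consecutive_alt
  have hA := pvFoldA_char t.toList s.toList 0 0
  simp only [Nat.cast_zero] at hA
  rw [hA, pvRef_eq_ref2]
  simp only [Nat.max_eq_right (Nat.zero_le _)] at *
  by_cases hlen : PySem.Str.len t ≠ 1
  · rw [if_pos hlen]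
    have : t.toList.length ≠ 1 := by
      intro he; apply hlen
      rw [PySem.Str.len_eq, he]; rfl
    rw [pvRef2_of_len_ne_one t.toList this s.toList]
    simp
  · rw [if_neg hlen]
    simp only [ne_eq, not_not] at hlen
    have hl1 : t.toList.length = 1 := by
      have := hlen
      rw [PySem.Str.len_eq] at this
      exact_mod_cast this
    obtain ⟨c, hc⟩ : ∃ c, t.toList = [c] := by
      cases h : t.toList with
      | nil => rw [h] at hl1; simp at hl1
      | cons a l =>
        rw [h] at hl1
        simp at hl1
        exact ⟨a, by rw [hl1]⟩
    rw [hc]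
    set M := pvRef2 [c] s.toList with hM
    have hfeas : ∀ k : Int,
        PySem.Chars.isIn (PySem.List.pyRepeat [c] k) s.toList = true ↔ k.toNat ≤ M := by
      intro k
      rw [PySem.List.pyRepeat_singleton, PySem.Chars.isIn_iff_infix]
      constructor
      · exact pvInfix_le c s.toList k.toNat
      · exact pvLe_infix c s.toList k.toNat
    have hMle : M ≤ s.toList.length := by
      have := (pvLe_infix c s.toList M le_rfl).length_le
      simpa using this
    have := pvBS_eq s.toList [c] M hfeas 0 (PySem.Str.len s) (le_refl 0)
      (by exact_mod_cast Nat.zero_le M)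
      (by rw [PySem.Str.len_eq]; exact_mod_cast hMle)
    rw [this]
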